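-- pv_equiv track=rewrite | github.com/RicardoSync/ConnectionApp | leases.py | parse_leases
-- ===== SOURCE A (Python) =====
-- def parse_leases(output):
--     leases = []
--     lease = {}
--     for line in output.splitlines():
--         if line.startswith(" "):  # Línea de detalles
--             if 'address=' in line:
--                 lease['IP'] = line.split("address=")[-1].split()[0].strip()
--             elif 'mac-address=' in line:
--                 lease['MAC'] = line.split("mac-address=")[-1].split()[0].strip()
--             elif 'host-name=' in line:
--                 lease['Host'] = line.split("host-name=")[-1].split()[0].strip('"')
--             elif 'expires-after=' in line:
--                 lease['LeaseTime'] = line.split("expires-after=")[-1].split()[0].strip()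
--         elif line.strip() == "":  # Fin del registro
--             if lease:
--                 leases.append(lease)
--                 lease = {}
--
--     # Añadir el último lease si existe
--     if lease:
--         leases.append(lease)
--
--     return leases
-- ===== SOURCE B (Python) =====
-- _FIELDS = (
--     ("address=", "IP"),
--     ("mac-address=", "MAC"),
--     ("host-name=", "Host"),
--     ("expires-after=", "LeaseTime"),
-- )
--
--
-- def _parse_record(lines):
--     rec = {}
--     for line in lines:
--         if not line.startswith(" "):
--             continue
--         for key, field in _FIELDS:
--             if key in line:
--                 token = line.split(key)[-1].split()[0]
--                 rec[field] = token.strip('"') if field == "Host" else token.strip()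
--                 break
--     return rec
--
--
-- def parse_leases(output):
--     # group lines into records, cutting at separator lines, then parse each record
--     records = []
--     current = []
--     for line in output.splitlines():
--         if not line.startswith(" ") and line.strip() == "":
--             records.append(current)
--             current = []
--         else:
--             current.append(line)
--     records.append(current)
--     return [rec for rec in map(_parse_record, records) if rec]
-- ===== Notes on version B (the rewrite author's own statement) =====
-- stated objective: alternative
-- what changed: A streams over all lines mutating one current dict and flushing it at separator lines; B first partitions the lines into records at the separator lines and then parses each record independently with a key/field table loop instead of A's elif chain, keeping the non-empty dicts.
import Mathlib
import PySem

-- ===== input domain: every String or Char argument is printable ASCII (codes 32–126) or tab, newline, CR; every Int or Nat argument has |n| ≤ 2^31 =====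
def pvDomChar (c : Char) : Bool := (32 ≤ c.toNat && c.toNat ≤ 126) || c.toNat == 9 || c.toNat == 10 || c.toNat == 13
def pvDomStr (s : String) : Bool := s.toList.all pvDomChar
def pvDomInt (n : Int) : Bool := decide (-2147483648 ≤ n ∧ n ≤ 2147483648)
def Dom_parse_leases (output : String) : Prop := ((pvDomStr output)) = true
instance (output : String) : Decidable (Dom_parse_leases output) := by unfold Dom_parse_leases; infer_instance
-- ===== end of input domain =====

-- B groups the lines into records at separator lines and then parses each record
-- independently with a field table; A streams over all lines with one current dict.
-- Same return value; objective: a simpler/alternative decomposition, not speed.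

-- shared token extraction `line.split(key)[-1].split()[0]` (textually present in both
-- Pythons); the last `[0]` is IndexError in Python when the token list is empty — there
-- it returns "" and Pre_ excludes such inputs.
def pvToks (line key : String) : List String :=
  PySem.Str.split₀ ((PySem.List.pyGet? ((PySem.Str.split? line key).getD []) (-1)).getD "")

def pvTok (line key : String) : String :=
  (PySem.List.pyGet? (pvToks line key) 0).getD ""

-- ===== PORT A =====
def pvStepA (st : List (PySem.Dict String String) × PySem.Dict String String)
    (line : String) : List (PySem.Dict String String) × PySem.Dict String String :=
  if PySem.Str.startswith line " " then
    (st.1,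
      if PySem.Str.isIn "address=" line then
        st.2.insert "IP" (PySem.Str.strip (pvTok line "address="))
      else if PySem.Str.isIn "mac-address=" line then
        st.2.insert "MAC" (PySem.Str.strip (pvTok line "mac-address="))
      else if PySem.Str.isIn "host-name=" line then
        st.2.insert "Host" (PySem.Str.stripChars (pvTok line "host-name=") "\"")
      else if PySem.Str.isIn "expires-after=" line then
        st.2.insert "LeaseTime" (PySem.Str.strip (pvTok line "expires-after="))
      else st.2)
  else if PySem.Str.strip line == "" then
    (if st.2.items.isEmpty then st else (st.1 ++ [st.2], PySem.Dict.empty))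
  else st

def parse_leases (output : String) : List (List (String × String)) :=
  let fin := (PySem.Str.splitlines output).foldl pvStepA ([], PySem.Dict.empty)
  (if fin.2.items.isEmpty then fin.1 else fin.1 ++ [fin.2]).map (·.items)

-- ===== PORT B =====
def pvFields : List (String × String) :=
  [("address=", "IP"), ("mac-address=", "MAC"), ("host-name=", "Host"), ("expires-after=", "LeaseTime")]

def pvExtract (line : String) (rec : PySem.Dict String String) :
    List (String × String) → PySem.Dict String String
  | [] => rec
  | (key, field) :: rest =>
    if PySem.Str.isIn key line then
      rec.insert field
        (if field == "Host" then PySem.Str.stripChars (pvTok line key) "\""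
         else PySem.Str.strip (pvTok line key))
    else pvExtract line rec rest

def pvStepB (rec : PySem.Dict String String) (line : String) : PySem.Dict String String :=
  if PySem.Str.startswith line " " then pvExtract line rec pvFields else rec

def pvParseRecord (lines : List String) : PySem.Dict String String :=
  lines.foldl pvStepB PySem.Dict.empty

def pvPartStep (st : List (List String) × List String) (line : String) :
    List (List String) × List String :=
  if !PySem.Str.startswith line " " && PySem.Str.strip line == "" then (st.1 ++ [st.2], [])
  else (st.1, st.2 ++ [line])

def parse_leases_alt (output : String) : List (List (String × String)) :=
  let fin := (PySem.Str.splitlines output).foldl pvPartStep ([], [])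
  (((fin.1 ++ [fin.2]).map pvParseRecord).filter (fun rec => !rec.items.isEmpty)).map (·.items)

-- ===== PRECONDITION & SPEC =====
-- Pre_ excludes exactly the inputs where Python A raises IndexError: a detail line whose
-- selected `key=` marker is followed only by whitespace, making `.split()[0]` fail.
def pvLineOK (line : String) : Bool :=
  !PySem.Str.startswith line " " ||
  (if PySem.Str.isIn "address=" line then !(pvToks line "address=").isEmpty
   else if PySem.Str.isIn "mac-address=" line then !(pvToks line "mac-address=").isEmpty
   else if PySem.Str.isIn "host-name=" line then !(pvToks line "host-name=").isEmpty
   else if PySem.Str.isIn "expires-after=" line then !(pvToks line "expires-after=").isEmpty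
   else true)

def Pre_parse_leases (output : String) : Prop :=
  ∀ line ∈ PySem.Str.splitlines output, pvLineOK line = true

instance (output : String) : Decidable (Pre_parse_leases output) := by
  unfold Pre_parse_leases; infer_instance

def pvWitness_parse_leases : String :=
  "  address=10.0.0.9 mac-address=AA:BB\n  host-name=\"pc\"\n\n  expires-after=10m"

def Spec_parse_leases (output : String) (out : List (List (String × String))) : Prop := out = parse_leases_alt output
instance (output : String) (out : List (List (String × String))) : Decidable (Spec_parse_leases output out) := by unfold Spec_parse_leases; infer_instance

-- ===== CLAIM (what is proved, stated in full; the proofs are below) =====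
def Claim_equal_parse_leases : Prop := ∀ (output : String), Dom_parse_leases output → Pre_parse_leases output → Spec_parse_leases output (parse_leases output)

-- ===== LEMMAS AND PROOFS =====

-- a separator line of A (flush) and of B (cut)
def pvIsSep (line : String) : Bool :=
  !PySem.Str.startswith line " " && PySem.Str.strip line == ""

def pvConsHead (x : String) : List (List String) → List (List String)
  | [] => [[x]]
  | r :: rs => (x :: r) :: rs

-- the records B's partition pass produces, as a recursion over the lines
def pvSplitRecs : List String → List (List String)
  | [] => [[]]
  | l :: ls => if pvIsSep l then [] :: pvSplitRecs ls else pvConsHead l (pvSplitRecs ls)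

def pvPrepend (cur : List String) : List (List String) → List (List String)
  | [] => [cur]
  | r :: rs => (cur ++ r) :: rs

lemma pvSplitRecs_ne_nil (ls : List String) : pvSplitRecs ls ≠ [] := by
  cases ls with
  | nil => simp [pvSplitRecs]
  | cons l ls =>
    simp only [pvSplitRecs]
    split
    · simp
    · cases h : pvSplitRecs ls <;> simp [pvConsHead]

lemma pvPartEq (ls : List String) (recs : List (List String)) (cur : List String) :
    (ls.foldl pvPartStep (recs, cur)).1 ++ [(ls.foldl pvPartStep (recs, cur)).2]
      = recs ++ pvPrepend cur (pvSplitRecs ls) := by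
  induction ls generalizing recs cur with
  | nil => simp [pvSplitRecs, pvPrepend]
  | cons l ls ih =>
    by_cases hc : (!PySem.Str.startswith l " " && (PySem.Str.strip l == "")) = true
    · have hs : pvPartStep (recs, cur) l = (recs ++ [cur], []) := by
        simp only [pvPartStep]; rw [if_pos hc]
      have hsep : pvSplitRecs (l :: ls) = [] :: pvSplitRecs ls := by
        simp only [pvSplitRecs]; rw [if_pos (show pvIsSep l = true from hc)]
      simp only [List.foldl_cons, hs, ih, hsep]
      cases hr : pvSplitRecs ls with
      | nil => exact absurd hr (pvSplitRecs_ne_nil ls)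
      | cons r rs => simp [pvPrepend]
    · have hs : pvPartStep (recs, cur) l = (recs, cur ++ [l]) := by
        simp only [pvPartStep]; rw [if_neg hc]
      have hsep : pvSplitRecs (l :: ls) = pvConsHead l (pvSplitRecs ls) := by
        simp only [pvSplitRecs]; rw [if_neg (show ¬ pvIsSep l = true from hc)]
      simp only [List.foldl_cons, hs, ih, hsep]
      cases hr : pvSplitRecs ls with
      | nil => exact absurd hr (pvSplitRecs_ne_nil ls)
      | cons r rs => simp [pvConsHead, pvPrepend]

-- A's elif chain on a detail line is B's field-table scan
lemma pvExtract_eq (line : String) (d : PySem.Dict String String) :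
    (if PySem.Str.isIn "address=" line then
        d.insert "IP" (PySem.Str.strip (pvTok line "address="))
      else if PySem.Str.isIn "mac-address=" line then
        d.insert "MAC" (PySem.Str.strip (pvTok line "mac-address="))
      else if PySem.Str.isIn "host-name=" line then
        d.insert "Host" (PySem.Str.stripChars (pvTok line "host-name=") "\"")
      else if PySem.Str.isIn "expires-after=" line then
        d.insert "LeaseTime" (PySem.Str.strip (pvTok line "expires-after="))
      else d)
    = pvExtract line d pvFields := by
  simp [pvExtract, pvFields,
    show (("IP" : String) == "Host") = false by decide,
    show (("MAC" : String) == "Host") = false by decide,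
    show (("LeaseTime" : String) == "Host") = false by decide]
  split_ifs <;> rfl

def pvPrepParse (d : PySem.Dict String String) :
    List (List String) → List (PySem.Dict String String)
  | [] => []
  | r :: rs => r.foldl pvStepB d :: rs.map pvParseRecord

lemma pvPrepParse_empty (rs : List (List String)) :
    pvPrepParse PySem.Dict.empty rs = rs.map pvParseRecord := by
  cases rs <;> rfl

lemma pvMainA (ls : List String) (recs : List (PySem.Dict String String))
    (d : PySem.Dict String String) :
    (if (ls.foldl pvStepA (recs, d)).2.items.isEmpty then (ls.foldl pvStepA (recs, d)).1
     else (ls.foldl pvStepA (recs, d)).1 ++ [(ls.foldl pvStepA (recs, d)).2])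
      = recs ++ (pvPrepParse d (pvSplitRecs ls)).filter (fun r => !r.items.isEmpty) := by
  induction ls generalizing recs d with
  | nil =>
    simp only [List.foldl_nil, pvSplitRecs, pvPrepParse, List.foldl_nil]
    by_cases h : d.items.isEmpty <;> simp [h, List.filter]
  | cons l ls ih =>
    by_cases h1 : PySem.Str.startswith l " " = true
    · -- detail line: joins the current record in B, updates the dict in A
      have hs : pvStepA (recs, d) l = (recs, pvExtract l d pvFields) := by
        simp only [pvStepA]; rw [if_pos h1, pvExtract_eq]
      have hns : pvSplitRecs (l :: ls) = pvConsHead l (pvSplitRecs ls) := by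
        simp only [pvSplitRecs]
        rw [if_neg (show ¬ pvIsSep l = true by simp only [pvIsSep]; rw [h1]; simp)]
      simp only [List.foldl_cons, hs, ih, hns]
      cases hr : pvSplitRecs ls with
      | nil => exact absurd hr (pvSplitRecs_ne_nil ls)
      | cons r rs =>
        have hb : pvStepB d l = pvExtract l d pvFields := by
          simp only [pvStepB]; rw [if_pos h1]
        simp [pvConsHead, pvPrepParse, hb]
    · by_cases h2 : (PySem.Str.strip l == "") = true
      · -- separator line: A flushes, B cuts
        have hsep : pvSplitRecs (l :: ls) = [] :: pvSplitRecs ls := by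
          simp only [pvSplitRecs]
          rw [if_pos (show pvIsSep l = true by
            simp only [pvIsSep]; rw [Bool.not_eq_true] at h1; rw [h1, h2]; rfl)]
        by_cases he : d.items.isEmpty = true
        · have hd : d = PySem.Dict.empty := by
            apply PySem.Dict.ext; simpa [List.isEmpty_iff] using he
          have hs : pvStepA (recs, d) l = (recs, d) := by
            simp only [pvStepA]; rw [if_neg h1, if_pos h2, if_pos he]
          rw [List.foldl_cons, hs, ih, hsep, hd, pvPrepParse_empty]
          simp only [pvPrepParse, List.foldl_nil]
          simp [show (PySem.Dict.empty : PySem.Dict String String).items = [] from rfl]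
        · have hs : pvStepA (recs, d) l = (recs ++ [d], PySem.Dict.empty) := by
            simp only [pvStepA]; rw [if_neg h1, if_pos h2, if_neg he]
          rw [List.foldl_cons, hs, ih, hsep, pvPrepParse_empty]
          simp only [pvPrepParse, List.foldl_nil]
          simp only [Bool.not_eq_true] at he
          simp [he]
      · -- ignored line: A skips it, B stores it in the record (where it is skipped too)
        have hs : pvStepA (recs, d) l = (recs, d) := by
          simp only [pvStepA]; rw [if_neg h1, if_neg h2]
        have hns : pvSplitRecs (l :: ls) = pvConsHead l (pvSplitRecs ls) := by
          simp only [pvSplitRecs]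
          have h2' : (PySem.Str.strip l == "") = false := eq_false_of_ne_true h2
          rw [if_neg (show ¬ pvIsSep l = true by simp only [pvIsSep]; rw [h2']; simp)]
        simp only [List.foldl_cons, hs, ih, hns]
        cases hr : pvSplitRecs ls with
        | nil => exact absurd hr (pvSplitRecs_ne_nil ls)
        | cons r rs =>
          have hb : pvStepB d l = d := by
            simp only [pvStepB]; rw [if_neg h1]
          simp [pvConsHead, pvPrepParse, hb]

lemma pvPrepend_nil (rs : List (List String)) (h : rs ≠ []) : pvPrepend [] rs = rs := by
  cases rs with
  | nil => exact absurd rfl h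
  | cons r t => simp [pvPrepend]

-- ===== VERDICT (by name: the statement is the Claim_ definition above) =====
theorem parse_leases_spec : Claim_equal_parse_leases := by
  intro output _ _
  unfold Spec_parse_leases parse_leases parse_leases_alt
  have hA := pvMainA (PySem.Str.splitlines output) [] PySem.Dict.empty
  have hB := pvPartEq (PySem.Str.splitlines output) [] []
  rw [pvPrepend_nil _ (pvSplitRecs_ne_nil _)] at hB
  simp only [List.nil_append] at hA hB
  simp only [hA, hB, pvPrepParse_empty]
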